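-- pv_equiv track=rewrite | github.com/AnushkaGang/dna-algorithms-cca3 | dna_optimize.py | stream_counts
-- ===== SOURCE A (Python) =====
-- from typing import Dict, Iterable, Tuple
--
-- def stream_counts(lines: Iterable[str]) -> Dict[str, int]:
--     """
--     Count A/T/G/C from an iterable of lines without loading full sequence.
--     - Uppercases on the fly.
--     - Ignores non-ATGC (Q3 cleaning idea).
--     O(total chars) time, O(1) aux.
--     """
--     a = t = g = c = 0
--     for line in lines:
--         for ch in line.upper():
--             if ch == "A": a += 1
--             elif ch == "T": t += 1
--             elif ch == "G": g += 1
--             elif ch == "C": c += 1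
--             else:
--                 # ignore other characters (headers, Ns, gaps, whitespace)
--                 pass
--     return {"A": a, "T": t, "G": g, "C": c}
-- ===== SOURCE B (Python) =====
-- def stream_counts(lines):
--     a = t = g = c = 0
--     for line in lines:
--         u = line.upper()
--         a += u.count("A")
--         t += u.count("T")
--         g += u.count("G")
--         c += u.count("C")
--     return {"A": a, "T": t, "G": g, "C": c}
-- ===== Notes on version B (the rewrite author's own statement) =====
-- stated objective: idiomatic
-- what changed: Replaces the character-by-character loop with a 4-way if/elif chain by four str.count library scans per uppercased line, accumulating the four totals directly.
import Mathlib
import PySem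

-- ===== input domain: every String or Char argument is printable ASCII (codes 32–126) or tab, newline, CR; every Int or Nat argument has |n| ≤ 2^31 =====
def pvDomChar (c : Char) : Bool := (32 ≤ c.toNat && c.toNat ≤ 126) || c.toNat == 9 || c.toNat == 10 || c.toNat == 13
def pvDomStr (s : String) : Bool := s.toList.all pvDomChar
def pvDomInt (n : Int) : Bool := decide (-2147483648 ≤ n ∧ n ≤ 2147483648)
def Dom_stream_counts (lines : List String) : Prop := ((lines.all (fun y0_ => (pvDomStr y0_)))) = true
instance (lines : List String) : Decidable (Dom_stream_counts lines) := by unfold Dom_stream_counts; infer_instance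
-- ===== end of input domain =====

-- B replaces A's per-character if/elif loop by four str.count scans per uppercased line (more idiomatic; same cost).

-- ===== PORT A =====
def stream_counts (lines : List String) : List (String × Int) :=
  let r : Int × Int × Int × Int :=
    lines.foldl (fun s line =>
      (PySem.Str.upper line).toList.foldl (fun s ch =>
        if ch = 'A' then (s.1 + 1, s.2.1, s.2.2.1, s.2.2.2)
        else if ch = 'T' then (s.1, s.2.1 + 1, s.2.2.1, s.2.2.2)
        else if ch = 'G' then (s.1, s.2.1, s.2.2.1 + 1, s.2.2.2)
        else if ch = 'C' then (s.1, s.2.1, s.2.2.1, s.2.2.2 + 1)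
        else s) s) (0, 0, 0, 0)
  [("A", r.1), ("T", r.2.1), ("G", r.2.2.1), ("C", r.2.2.2)]

-- ===== PORT B =====
def stream_counts_alt (lines : List String) : List (String × Int) :=
  let r : Int × Int × Int × Int :=
    lines.foldl (fun s line =>
      let u := PySem.Str.upper line
      (s.1 + (PySem.Str.count u "A" : Int),
       s.2.1 + (PySem.Str.count u "T" : Int),
       s.2.2.1 + (PySem.Str.count u "G" : Int),
       s.2.2.2 + (PySem.Str.count u "C" : Int))) (0, 0, 0, 0)
  [("A", r.1), ("T", r.2.1), ("G", r.2.2.1), ("C", r.2.2.2)]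

-- ===== PRECONDITION & SPEC =====
def Spec_stream_counts (lines : List String) (out : List (String × Int)) : Prop := out = stream_counts_alt lines
instance (lines : List String) (out : List (String × Int)) : Decidable (Spec_stream_counts lines out) := by unfold Spec_stream_counts; infer_instance

-- ===== CLAIM (what is proved, stated in full; the proofs are below) =====
def Claim_equal_stream_counts : Prop := ∀ (lines : List String), Dom_stream_counts lines → Spec_stream_counts lines (stream_counts lines)

-- ===== LEMMAS AND PROOFS =====

-- Chars.count with a single-character needle is List.count
theorem chars_count_go_singleton (c : Char) (l : List Char) (acc : Nat) :
    PySem.Chars.count.go [c] l.length l acc = acc + l.count c := by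
  induction l generalizing acc with
  | nil => simp [PySem.Chars.count.go]
  | cons h t ih =>
    simp only [List.length_cons, PySem.Chars.count.go, List.isPrefixOf, List.isPrefixOf_nil_left,
      Bool.and_true]
    by_cases hc : h = c
    · subst hc
      simp [List.drop, ih, List.count_cons]
      omega
    · have : (c == h) = false := by simp [beq_iff_eq]; exact fun e => hc e.symm
      simp [this, ih, List.count_cons, beq_iff_eq, hc]

theorem chars_count_singleton (cs : List Char) (c : Char) :
    PySem.Chars.count cs [c] = cs.count c := by
  simpa [PySem.Chars.count] using chars_count_go_singleton c cs 0

-- the inner per-character fold of A computes the four character counts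
theorem inner_fold_eq (cs : List Char) (s : Int × Int × Int × Int) :
    cs.foldl (fun s ch =>
        if ch = 'A' then (s.1 + 1, s.2.1, s.2.2.1, s.2.2.2)
        else if ch = 'T' then (s.1, s.2.1 + 1, s.2.2.1, s.2.2.2)
        else if ch = 'G' then (s.1, s.2.1, s.2.2.1 + 1, s.2.2.2)
        else if ch = 'C' then (s.1, s.2.1, s.2.2.1, s.2.2.2 + 1)
        else s) s
      = (s.1 + cs.count 'A', s.2.1 + cs.count 'T',
         s.2.2.1 + cs.count 'G', s.2.2.2 + cs.count 'C') := by
  induction cs generalizing s with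
  | nil => simp
  | cons h t ih =>
    simp only [List.foldl_cons]
    rw [ih]
    split_ifs with h1 h2 h3 h4
    · subst h1
      rw [List.count_cons_self, List.count_cons_of_ne (by decide),
        List.count_cons_of_ne (by decide), List.count_cons_of_ne (by decide)]
      simp only [Prod.mk.injEq]
      push_cast
      and_intros <;> first | trivial | ring
    · subst h2
      rw [List.count_cons_self, List.count_cons_of_ne (by decide),
        List.count_cons_of_ne (by decide), List.count_cons_of_ne (by decide)]
      simp only [Prod.mk.injEq]
      push_cast
      and_intros <;> first | trivial | ring
    · subst h3
      rw [List.count_cons_self, List.count_cons_of_ne (by decide),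
        List.count_cons_of_ne (by decide), List.count_cons_of_ne (by decide)]
      simp only [Prod.mk.injEq]
      push_cast
      and_intros <;> first | trivial | ring
    · subst h4
      rw [List.count_cons_self, List.count_cons_of_ne (by decide),
        List.count_cons_of_ne (by decide), List.count_cons_of_ne (by decide)]
      simp only [Prod.mk.injEq]
      push_cast
      and_intros <;> first | trivial | ring
    · rw [List.count_cons_of_ne h1, List.count_cons_of_ne h2,
        List.count_cons_of_ne h3, List.count_cons_of_ne h4]

theorem outer_fold_eq (lines : List String) (s : Int × Int × Int × Int) :
    lines.foldl (fun s line =>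
      (PySem.Str.upper line).toList.foldl (fun s ch =>
        if ch = 'A' then (s.1 + 1, s.2.1, s.2.2.1, s.2.2.2)
        else if ch = 'T' then (s.1, s.2.1 + 1, s.2.2.1, s.2.2.2)
        else if ch = 'G' then (s.1, s.2.1, s.2.2.1 + 1, s.2.2.2)
        else if ch = 'C' then (s.1, s.2.1, s.2.2.1, s.2.2.2 + 1)
        else s) s) s
    = lines.foldl (fun s line =>
      let u := PySem.Str.upper line
      (s.1 + (PySem.Str.count u "A" : Int),
       s.2.1 + (PySem.Str.count u "T" : Int),
       s.2.2.1 + (PySem.Str.count u "G" : Int),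
       s.2.2.2 + (PySem.Str.count u "C" : Int))) s := by
  induction lines generalizing s with
  | nil => rfl
  | cons line rest ih =>
    simp only [List.foldl_cons, inner_fold_eq, ih, PySem.Str.count_eq]
    have hA : ("A" : String).toList = ['A'] := rfl
    have hT : ("T" : String).toList = ['T'] := rfl
    have hG : ("G" : String).toList = ['G'] := rfl
    have hC : ("C" : String).toList = ['C'] := rfl
    simp only [hA, hT, hG, hC, chars_count_singleton]

-- ===== VERDICT (by name: the statement is the Claim_ definition above) =====
theorem stream_counts_spec : Claim_equal_stream_counts := by
  intro lines _
  unfold Spec_stream_counts stream_counts stream_counts_alt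
  simp only [outer_fold_eq]
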